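-- pv_equiv track=rewrite | github.com/CHART-Research/AdaSeg4MR | ada.py | get_position_descriptors
-- ===== SOURCE A (Python) =====
-- def get_position_descriptors(count):
--     """Generate position descriptor word based on object count"""
--     if count == 1:
--         return [""]
--     elif count == 2:
--         return ["on the left", "on the right"]
--     else:
--         result = []
--         for i in range(count):
--             if i == 0:
--                 result.append("on the far left")
--             elif i == count - 1:
--                 result.append("on the far right")
--             elif i == 1:
--                 result.append("on the left")
--             elif i == count - 2:
--                 result.append("on the right")
--             else:
--                 relative_position = (i / (count - 1)) * 100
--                 result.append(f"at position {i+1} from the left")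
--         return result
-- ===== SOURCE B (Python) =====
-- def get_position_descriptors(count):
--     """Generate position descriptor word based on object count"""
--     if count == 1:
--         return [""]
--     if count == 2:
--         return ["on the left", "on the right"]
--     if count <= 0:
--         return []
--     if count == 3:
--         return ["on the far left", "on the left", "on the far right"]
--     middle = [f"at position {i+1} from the left" for i in range(2, count - 2)]
--     return ["on the far left", "on the left"] + middle + ["on the right", "on the far right"]
-- ===== Notes on version B (the rewrite author's own statement) =====
-- stated objective: simpler
-- what changed: Instead of A's single loop with a five-way branch per index, B assembles the list by concatenation of three segments: a fixed two-element left end, one comprehension producing only the generic middle labels for range(2, count-2), and a fixed two-element right end, with literal returns for counts 1, 2, 3 and <=0.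
import Mathlib
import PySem

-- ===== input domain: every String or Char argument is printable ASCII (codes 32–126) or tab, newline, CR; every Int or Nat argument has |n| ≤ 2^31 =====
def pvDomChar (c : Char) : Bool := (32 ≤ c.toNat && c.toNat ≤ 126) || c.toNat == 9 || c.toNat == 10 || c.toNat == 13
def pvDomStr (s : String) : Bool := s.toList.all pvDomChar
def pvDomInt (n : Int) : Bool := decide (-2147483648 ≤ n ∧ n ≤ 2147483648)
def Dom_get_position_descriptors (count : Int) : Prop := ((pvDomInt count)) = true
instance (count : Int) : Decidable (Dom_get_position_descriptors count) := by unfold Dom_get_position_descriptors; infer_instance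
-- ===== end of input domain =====

-- B builds the answer by concatenating fixed endpoint segments around one generic middle block, instead of A's per-index branch cascade (objective: simpler).


-- ===== PORT A =====
def get_position_descriptors (count : Int) : List String :=
  if count == 1 then [""]
  else if count == 2 then ["on the left", "on the right"]
  else
    (PySem.List.pyRange 0 count 1).foldl (fun result i =>
      if i == 0 then result ++ ["on the far left"]
      else if i == count - 1 then result ++ ["on the far right"]
      else if i == 1 then result ++ ["on the left"]
      else if i == count - 2 then result ++ ["on the right"]
      else result ++ ["at position " ++ PySem.Int.toStr (i + 1) ++ " from the left"]) []

-- ===== PORT B =====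
def get_position_descriptors_alt (count : Int) : List String :=
  if count == 1 then [""]
  else if count == 2 then ["on the left", "on the right"]
  else if count ≤ 0 then []
  else if count == 3 then ["on the far left", "on the left", "on the far right"]
  else
    let middle := (PySem.List.pyRange 2 (count - 2) 1).map
      (fun i => "at position " ++ PySem.Int.toStr (i + 1) ++ " from the left")
    ["on the far left", "on the left"] ++ middle ++ ["on the right", "on the far right"]

-- ===== PRECONDITION & SPEC =====
def Spec_get_position_descriptors (count : Int) (out : List String) : Prop := out = get_position_descriptors_alt count
instance (count : Int) (out : List String) : Decidable (Spec_get_position_descriptors count out) := by unfold Spec_get_position_descriptors; infer_instance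

-- ===== CLAIM (what is proved, stated in full; the proofs are below) =====
def Claim_equal_get_position_descriptors : Prop := ∀ (count : Int), Dom_get_position_descriptors count → Spec_get_position_descriptors count (get_position_descriptors count)

-- ===== LEMMAS AND PROOFS =====

-- A's loop body is 'result ++ [g i]' for the branch function g, so the whole loop is a map.
def pvBranch (count i : Int) : String :=
  if i == 0 then "on the far left"
  else if i == count - 1 then "on the far right"
  else if i == 1 then "on the left"
  else if i == count - 2 then "on the right"
  else "at position " ++ PySem.Int.toStr (i + 1) ++ " from the left"

theorem pvA_eq_map (count : Int) :
    (PySem.List.pyRange 0 count 1).foldl (fun result i =>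
      if i == 0 then result ++ ["on the far left"]
      else if i == count - 1 then result ++ ["on the far right"]
      else if i == 1 then result ++ ["on the left"]
      else if i == count - 2 then result ++ ["on the right"]
      else result ++ ["at position " ++ PySem.Int.toStr (i + 1) ++ " from the left"]) []
    = (PySem.List.pyRange 0 count 1).map (pvBranch count) := by
  have h : (fun (result : List String) (i : Int) =>
      if i == 0 then result ++ ["on the far left"]
      else if i == count - 1 then result ++ ["on the far right"]
      else if i == 1 then result ++ ["on the left"]
      else if i == count - 2 then result ++ ["on the right"]
      else result ++ ["at position " ++ PySem.Int.toStr (i + 1) ++ " from the left"])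
      = (fun result i => result ++ [pvBranch count i]) := by
    funext result i
    simp only [pvBranch]
    split_ifs <;> rfl
  rw [h, PySem.List.foldl_append_singleton_eq_map]
  simp

theorem get_position_descriptors_spec : Claim_equal_get_position_descriptors := by
  intro count _
  show get_position_descriptors count = get_position_descriptors_alt count
  unfold get_position_descriptors get_position_descriptors_alt
  by_cases h1 : count = 1
  · simp [h1]
  by_cases h2 : count = 2
  · simp [h2]
  have hb1 : (count == 1) = false := by simp [h1]
  have hb2 : (count == 2) = false := by simp [h2]
  simp only [hb1, hb2, Bool.false_eq_true, if_false]
  rw [pvA_eq_map]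
  by_cases h0 : count ≤ 0
  · simp [h0, PySem.List.pyRange_one_eq_nil h0]
  by_cases h3 : count = 3
  · subst h3
    have : PySem.List.pyRange 0 3 1 = [0, 1, 2] := by decide
    rw [this]
    simp [pvBranch]
  · -- count ≥ 4: split the range into the two-element ends and the generic middle
    have h4 : 4 ≤ count := by omega
    have hsplit1 : PySem.List.pyRange 0 count 1
        = PySem.List.pyRange 0 2 1 ++ PySem.List.pyRange 2 count 1 :=
      PySem.List.pyRange_one_append 0 2 count (by omega) (by omega)
    have hsplit2 : PySem.List.pyRange 2 count 1
        = PySem.List.pyRange 2 (count - 2) 1 ++ PySem.List.pyRange (count - 2) count 1 :=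
      PySem.List.pyRange_one_append 2 (count - 2) count (by omega) (by omega)
    have hend : PySem.List.pyRange (count - 2) count 1 = [count - 2, count - 1] := by
      rw [PySem.List.pyRange_one_cons (by omega)]
      have he : count - 2 + 1 = count - 1 := by omega
      rw [he, PySem.List.pyRange_one_cons (by omega), PySem.List.pyRange_one_eq_nil (by omega)]
    have hfront : PySem.List.pyRange 0 2 1 = [0, 1] := by decide
    have hb3 : (count == 3) = false := by simp [h3]
    simp only [h0, hb3, Bool.false_eq_true, if_false]
    rw [hsplit1, hsplit2, hend, hfront]
    simp only [List.map_append, List.map_cons, List.map_nil]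
    have hmid : (PySem.List.pyRange 2 (count - 2) 1).map (pvBranch count)
        = (PySem.List.pyRange 2 (count - 2) 1).map
            (fun i => "at position " ++ PySem.Int.toStr (i + 1) ++ " from the left") := by
      apply List.map_congr_left
      intro i hi
      have := (PySem.List.mem_pyRange_one.mp hi)
      simp only [pvBranch, beq_iff_eq]
      split_ifs <;> first | rfl | omega
    rw [hmid]
    have e0 : pvBranch count 0 = "on the far left" := by simp [pvBranch]
    have e1 : pvBranch count 1 = "on the left" := by
      simp only [pvBranch, beq_iff_eq]; split_ifs <;> first | rfl | omega
    have e2 : pvBranch count (count - 2) = "on the right" := by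
      simp only [pvBranch, beq_iff_eq]; split_ifs <;> first | rfl | omega
    have e3 : pvBranch count (count - 1) = "on the far right" := by
      simp only [pvBranch, beq_iff_eq]; split_ifs <;> first | rfl | omega
    rw [e0, e1, e2, e3]
    simp
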